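-- pv_equiv track=rewrite | github.com/jacek-kozakowski/autonomous-ci-agent | agent/retry.py | retry_policy
-- ===== SOURCE A (Python) =====
-- MAX_RETRIES = 3
--
-- RETRIABLE_TESTS = ["ConnectionError", "NetworkError", "TimeoutError", "NoSuchElementException", "ResourceUnavailable"]
--
-- NON_RETRIABLE_TESTS = ["AssertionError", "ModuleNotFoundError", ]
--
-- def retry_policy(retries: int, error_types: list) -> bool:
--     if retries >= MAX_RETRIES:
--         return False
--
--     if any(err in NON_RETRIABLE_TESTS for err in error_types):
--         return False
--
--     if all(err in RETRIABLE_TESTS for err in error_types):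
--         return True
--
--     return False
-- ===== SOURCE B (Python) =====
-- MAX_RETRIES = 3
--
-- RETRIABLE_TESTS = ["ConnectionError", "NetworkError", "TimeoutError", "NoSuchElementException", "ResourceUnavailable"]
--
-- NON_RETRIABLE_TESTS = ["AssertionError", "ModuleNotFoundError", ]
--
-- def retry_policy(retries: int, error_types: list) -> bool:
--     if retries >= MAX_RETRIES:
--         return False
--     # Single short-circuiting pass: the first error outside RETRIABLE_TESTS
--     # refuses immediately.  One membership test suffices because
--     # NON_RETRIABLE_TESTS is disjoint from RETRIABLE_TESTS: anything outside
--     # the retriable set (explicitly non-retriable or unknown) means no retry.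
--     for err in error_types:
--         if err not in RETRIABLE_TESTS:
--             return False
--     return True
-- ===== Notes on version B (the rewrite author's own statement) =====
-- stated objective: simpler
-- what changed: Replaces A's two staged whole-list scans (any over NON_RETRIABLE_TESTS, then all over RETRIABLE_TESTS) by one short-circuiting pass that returns False at the first error outside RETRIABLE_TESTS, correct because the two constant lists are disjoint.
import Mathlib
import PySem

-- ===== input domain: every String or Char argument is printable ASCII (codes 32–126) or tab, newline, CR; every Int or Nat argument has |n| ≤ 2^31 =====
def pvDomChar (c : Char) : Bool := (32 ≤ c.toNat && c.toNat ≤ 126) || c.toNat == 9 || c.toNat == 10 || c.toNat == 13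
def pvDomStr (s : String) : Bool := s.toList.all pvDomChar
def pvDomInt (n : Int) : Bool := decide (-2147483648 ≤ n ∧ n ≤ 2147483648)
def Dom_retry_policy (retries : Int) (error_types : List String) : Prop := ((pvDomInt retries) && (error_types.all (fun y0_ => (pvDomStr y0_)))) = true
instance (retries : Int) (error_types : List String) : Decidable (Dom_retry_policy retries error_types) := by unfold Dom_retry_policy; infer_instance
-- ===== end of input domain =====

-- B replaces A's two staged scans by one short-circuiting pass over the error list (valid since the two constant lists are disjoint); objective: simpler.


-- ===== PORT A =====
def MAX_RETRIES : Int := 3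

def RETRIABLE_TESTS : List String := ["ConnectionError", "NetworkError", "TimeoutError", "NoSuchElementException", "ResourceUnavailable"]

def NON_RETRIABLE_TESTS : List String := ["AssertionError", "ModuleNotFoundError"]

def retry_policy (retries : Int) (error_types : List String) : Bool :=
  if MAX_RETRIES ≤ retries then false
  else if error_types.any (fun err => NON_RETRIABLE_TESTS.contains err) then false
  else if error_types.all (fun err => RETRIABLE_TESTS.contains err) then true
  else false

-- ===== PORT B =====
-- B's for-loop with early return, transcribed as the obvious structural recursion
def scan_retriable : List String → Bool
  | [] => true
  | e :: rest => if ¬ RETRIABLE_TESTS.contains e then false else scan_retriable rest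

def retry_policy_alt (retries : Int) (error_types : List String) : Bool :=
  if MAX_RETRIES ≤ retries then false
  else scan_retriable error_types

-- ===== PRECONDITION & SPEC =====
def Spec_retry_policy (retries : Int) (error_types : List String) (out : Bool) : Prop := out = retry_policy_alt retries error_types
instance (retries : Int) (error_types : List String) (out : Bool) : Decidable (Spec_retry_policy retries error_types out) := by unfold Spec_retry_policy; infer_instance

-- ===== CLAIM (what is proved, stated in full; the proofs are below) =====
def Claim_equal_retry_policy : Prop := ∀ (retries : Int) (error_types : List String), Dom_retry_policy retries error_types → Spec_retry_policy retries error_types (retry_policy retries error_types)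

-- ===== LEMMAS AND PROOFS =====

-- B's short-circuit scan is exactly "every error is in RETRIABLE_TESTS".
theorem scan_retriable_eq_all (l : List String) :
    scan_retriable l = l.all (fun err => RETRIABLE_TESTS.contains err) := by
  induction l with
  | nil => rfl
  | cons e rest ih =>
    simp only [scan_retriable, List.all_cons]
    by_cases h : RETRIABLE_TESTS.contains e <;> simp [h, ih]

-- The two constant lists are disjoint: all-retriable implies no non-retriable error.
theorem none_non_of_all_retriable (l : List String)
    (hall : l.all (fun err => RETRIABLE_TESTS.contains err) = true) :
    (l.any (fun err => NON_RETRIABLE_TESTS.contains err)) = false := by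
  apply Bool.eq_false_iff.mpr
  intro hcon
  obtain ⟨x, hx, hxn⟩ := List.any_eq_true.mp hcon
  have hxr := List.all_eq_true.mp hall x hx
  simp only [NON_RETRIABLE_TESTS, List.contains_eq_mem, List.mem_cons,
    List.not_mem_nil, or_false, decide_eq_true_eq] at hxn
  rcases hxn with rfl | rfl <;> exact absurd hxr (by decide)

-- ===== VERDICT (by name: the statement is the Claim_ definition above) =====
theorem retry_policy_spec : Claim_equal_retry_policy := by
  intro retries error_types _
  unfold Spec_retry_policy retry_policy retry_policy_alt
  by_cases hr : MAX_RETRIES ≤ retries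
  · simp [hr]
  · simp only [hr, if_false, scan_retriable_eq_all]
    cases hall : error_types.all (fun err => RETRIABLE_TESTS.contains err) with
    | true => rw [none_non_of_all_retriable _ hall]; simp
    | false =>
      cases hnon : (error_types.any fun err => NON_RETRIABLE_TESTS.contains err) <;> simp
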